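-- pv_equiv track=rewrite | github.com/42win/ACE | playgo_rev/go_minimax.py | count_territories
-- ===== SOURCE A (Python) =====
-- def count_territories(board, color):
--     """Count the territories controlled by a given color."""
--     visited = [[False] * len(board) for _ in range(len(board))]
--     territory = 0
--
--     for row in range(len(board)):
--         for col in range(len(board[row])):
--             if board[row][col] is None and not visited[row][col]:  # Empty cell and not visited
--                 if check_territory(board, row, col, color, visited):
--                     territory += 1
--
--     return territory
--
-- def check_territory(board, row, col, color, visited):
--     """Check if a territory is controlled by a given color."""
--     directions = [(1, 0), (-1, 0), (0, 1), (0, -1)]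
--     queue = [(row, col)]
--     visited[row][col] = True
--     is_territory = True
--
--     while queue:
--         r, c = queue.pop(0)
--         for dr, dc in directions:
--             nr, nc = r + dr, c + dc
--             if nr < 0 or nr >= len(board) or nc < 0 or nc >= len(board) or visited[nr][nc]:
--                 continue
--             if board[nr][nc] is None:
--                 visited[nr][nc] = True
--                 queue.append((nr, nc))
--             elif board[nr][nc] != color:
--                 is_territory = False
--
--     return is_territory
-- ===== SOURCE B (Python) =====
-- def count_territories(board, color):
--     """Count the territories controlled by a given color."""
--     n = len(board)
--     seen = set()
--     count = 0
--     for r in range(n):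
--         for c in range(len(board[r])):
--             if board[r][c] is None and (r, c) not in seen:
--                 # grow the whole empty region in place, scanning it with a cursor
--                 seen.add((r, c))
--                 region = [(r, c)]
--                 i = 0
--                 while i < len(region):
--                     x, y = region[i]
--                     i += 1
--                     for nx, ny in ((x + 1, y), (x - 1, y), (x, y + 1), (x, y - 1)):
--                         if 0 <= nx < n and 0 <= ny < n and (nx, ny) not in seen and board[nx][ny] is None:
--                             seen.add((nx, ny))
--                             region.append((nx, ny))
--                 # the region is territory iff every in-bounds neighbour stone has our color
--                 if all(board[nx][ny] is None or board[nx][ny] == color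
--                        for x, y in region
--                        for nx, ny in ((x + 1, y), (x - 1, y), (x, y + 1), (x, y - 1))
--                        if 0 <= nx < n and 0 <= ny < n):
--                     count += 1
--     return count
-- ===== Notes on version B (the rewrite author's own statement) =====
-- stated objective: simpler
-- what changed: One self-contained function instead of two: the n*n visited matrix becomes a coordinate set, the helper's queue with pop(0) and inline is_territory flag becomes a region list grown in place and scanned by a cursor, and enclosure is decided by a single all(...) pass over the collected region afterwards.
-- outside the precondition, e.g. on count_territories([[None, 'b']], 'b'): A returns 1, B returns 1
import Mathlib
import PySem

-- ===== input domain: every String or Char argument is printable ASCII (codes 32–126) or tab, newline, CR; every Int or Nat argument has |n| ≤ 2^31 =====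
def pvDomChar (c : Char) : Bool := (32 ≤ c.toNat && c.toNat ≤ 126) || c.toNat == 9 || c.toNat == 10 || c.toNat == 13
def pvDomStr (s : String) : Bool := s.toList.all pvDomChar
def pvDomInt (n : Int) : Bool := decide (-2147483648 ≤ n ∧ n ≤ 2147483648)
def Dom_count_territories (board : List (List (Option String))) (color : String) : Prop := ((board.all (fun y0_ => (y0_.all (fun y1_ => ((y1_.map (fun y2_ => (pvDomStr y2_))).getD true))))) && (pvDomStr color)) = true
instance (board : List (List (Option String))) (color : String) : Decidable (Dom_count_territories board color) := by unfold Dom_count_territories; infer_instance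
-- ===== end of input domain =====

-- B replaces A's n×n visited matrix / queue-with-pop(0) / inline flag by one function with a seen
-- set, a region list grown in place and scanned by a cursor, and a separate enclosure pass.

-- ===== PORT A =====
-- board[r][c]; exact for the in-range accesses the algorithm performs (out-of-range raises in
-- Python and is excluded by Pre_).
def pvBGet (board : List (List (Option String))) (r c : Int) : Option String :=
  PySem.List.pyGetD (PySem.List.pyGetD board r []) c none

-- visited[r][c] (read / set True); indices are guarded nonnegative and in range by the algorithm.
def pvMGet (v : List (List Bool)) (r c : Int) : Bool :=
  (v.getD r.toNat []).getD c.toNat false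

def pvMSet (v : List (List Bool)) (r c : Int) : List (List Bool) :=
  v.set r.toNat ((v.getD r.toNat []).set c.toNat true)

def pvDirs : List (Int × Int) := [(1, 0), (-1, 0), (0, 1), (0, -1)]

-- body of check_territory's inner 'for dr, dc in directions' loop, state (queue, visited, is_territory)
def pvScanA (board : List (List (Option String))) (color : String) (r c : Int)
    (st : List (Int × Int) × List (List Bool) × Bool) (d : Int × Int) :
    List (Int × Int) × List (List Bool) × Bool :=
  let nr := r + d.1
  let nc := c + d.2
  if nr < 0 ∨ (board.length : Int) ≤ nr ∨ nc < 0 ∨ (board.length : Int) ≤ nc ∨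
      pvMGet st.2.1 nr nc = true then st
  else if pvBGet board nr nc = none then (st.1 ++ [(nr, nc)], pvMSet st.2.1 nr nc, st.2.2)
  else if pvBGet board nr nc ≠ some color then (st.1, st.2.1, false)
  else st

-- 'while queue:' — fuel n*n+1 suffices: every pop was one enqueue, and cells are enqueued at most
-- once (marked visited on discovery); this is proved in the lemmas below.
def pvCheckLoop (board : List (List (Option String))) (color : String) :
    Nat → List (Int × Int) → List (List Bool) → Bool → List (List Bool) × Bool
  | 0, _, v, f => (v, f)
  | _ + 1, [], v, f => (v, f)
  | fuel + 1, (r, c) :: q, v, f =>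
      let st := pvDirs.foldl (pvScanA board color r c) (q, v, f)
      pvCheckLoop board color fuel st.1 st.2.1 st.2.2

def pvCheckTerritory (board : List (List (Option String))) (row col : Int) (color : String)
    (visited : List (List Bool)) : List (List Bool) × Bool :=
  pvCheckLoop board color (board.length * board.length + 1) [(row, col)]
    (pvMSet visited row col) true

-- body of the inner 'for col in range(len(board[row]))' loop, state (visited, territory)
def pvCellA (board : List (List (Option String))) (color : String) (row : Int)
    (st : List (List Bool) × Int) (col : Int) : List (List Bool) × Int :=
  if pvBGet board row col = none ∧ pvMGet st.1 row col = false then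
    let r := pvCheckTerritory board row col color st.1
    (r.1, if r.2 then st.2 + 1 else st.2)
  else st

def pvRowA (board : List (List (Option String))) (color : String)
    (st : List (List Bool) × Int) (row : Int) : List (List Bool) × Int :=
  (PySem.List.pyRange 0 ((PySem.List.pyGetD board row []).length : Int) 1).foldl
    (pvCellA board color row) st

def count_territories (board : List (List (Option String))) (color : String) : Int :=
  ((PySem.List.pyRange 0 (board.length : Int) 1).foldl (pvRowA board color)
    (List.replicate board.length (List.replicate board.length false), 0)).2

-- ===== PORT B =====
def pvNbrs (x y : Int) : List (Int × Int) := [(x + 1, y), (x - 1, y), (x, y + 1), (x, y - 1)]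

-- body of the 'for nx, ny in …' loop, state (region, seen)
def pvScanB (board : List (List (Option String)))
    (st : List (Int × Int) × PySem.Set (Int × Int)) (q : Int × Int) :
    List (Int × Int) × PySem.Set (Int × Int) :=
  if 0 ≤ q.1 ∧ q.1 < (board.length : Int) ∧ 0 ≤ q.2 ∧ q.2 < (board.length : Int) ∧
      st.2.contains q = false ∧ pvBGet board q.1 q.2 = none then
    (st.1 ++ [q], st.2.add q)
  else st

-- 'while i < len(region):' — the same fuel bound n*n+1 (each cursor step consumes one appended
-- cell and cells are appended at most once).
def pvGrow (board : List (List (Option String))) :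
    Nat → List (Int × Int) → Nat → PySem.Set (Int × Int) →
    List (Int × Int) × PySem.Set (Int × Int)
  | 0, region, _, seen => (region, seen)
  | fuel + 1, region, i, seen =>
      if h : i < region.length then
        let p := region[i]
        let st := (pvNbrs p.1 p.2).foldl (pvScanB board) (region, seen)
        pvGrow board fuel st.1 (i + 1) st.2
      else (region, seen)

-- one conjunct of the final all(...): an in-bounds neighbour must be empty or our color
def pvNbrOK (board : List (List (Option String))) (color : String) (q : Int × Int) : Bool :=
  if 0 ≤ q.1 ∧ q.1 < (board.length : Int) ∧ 0 ≤ q.2 ∧ q.2 < (board.length : Int) then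
    (pvBGet board q.1 q.2 == none) || (pvBGet board q.1 q.2 == some color)
  else true

def pvEnclosed (board : List (List (Option String))) (color : String)
    (region : List (Int × Int)) : Bool :=
  region.all (fun p => (pvNbrs p.1 p.2).all (pvNbrOK board color))

-- body of the inner 'for c in range(len(board[r]))' loop, state (seen, count)
def pvCellB (board : List (List (Option String))) (color : String) (r : Int)
    (st : PySem.Set (Int × Int) × Int) (c : Int) : PySem.Set (Int × Int) × Int :=
  if pvBGet board r c = none ∧ st.1.contains (r, c) = false then
    let g := pvGrow board (board.length * board.length + 1) [(r, c)] 0 (st.1.add (r, c))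
    (g.2, if pvEnclosed board color g.1 then st.2 + 1 else st.2)
  else st

def pvRowB (board : List (List (Option String))) (color : String)
    (st : PySem.Set (Int × Int) × Int) (r : Int) : PySem.Set (Int × Int) × Int :=
  (PySem.List.pyRange 0 ((PySem.List.pyGetD board r []).length : Int) 1).foldl
    (pvCellB board color r) st

def count_territories_alt (board : List (List (Option String))) (color : String) : Int :=
  ((PySem.List.pyRange 0 (board.length : Int) 1).foldl (pvRowB board color)
    (PySem.Set.empty, 0)).2

-- ===== PRECONDITION & SPEC =====
-- Pre_ admits square boards, and non-square boards with no empty cell (on which nothing is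
-- explored); it excludes ragged boards with an empty cell, where A's n×n-bounded indexing into
-- shorter rows can raise IndexError.
def Pre_count_territories (board : List (List (Option String))) (color : String) : Prop :=
  (∀ row ∈ board, row.length = board.length) ∨ (∀ row ∈ board, ∀ cell ∈ row, cell ≠ none)
instance (board : List (List (Option String))) (color : String) :
    Decidable (Pre_count_territories board color) := by
  unfold Pre_count_territories; infer_instance

def pvWitness_count_territories : List (List (Option String)) × String :=
  ([[none, some "b"], [some "b", some "b"]], "b")

def Spec_count_territories (board : List (List (Option String))) (color : String) (out : Int) : Prop := out = count_territories_alt board color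
instance (board : List (List (Option String))) (color : String) (out : Int) : Decidable (Spec_count_territories board color out) := by unfold Spec_count_territories; infer_instance

-- ===== CLAIM (what is proved, stated in full; the proofs are below) =====
def Claim_equal_count_territories : Prop := ∀ (board : List (List (Option String))) (color : String), Dom_count_territories board color → Pre_count_territories board color → Spec_count_territories board color (count_territories board color)

-- ===== LEMMAS AND PROOFS =====

-- joint invariant relating A's visited matrix to B's seen set
def pvInv (board : List (List (Option String))) (v : List (List Bool))
    (seen : PySem.Set (Int × Int)) : Prop :=
  v.length = board.length ∧ (∀ row ∈ v, row.length = board.length) ∧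
  List.Nodup seen ∧
  (∀ p ∈ seen, 0 ≤ p.1 ∧ p.1 < (board.length : Int) ∧ 0 ≤ p.2 ∧ p.2 < (board.length : Int) ∧
    pvBGet board p.1 p.2 = none) ∧
  (∀ r c : Int, 0 ≤ r → r < (board.length : Int) → 0 ≤ c → c < (board.length : Int) →
    pvMGet v r c = seen.contains (r, c))


-- ----- small facts about the visited matrix and the seen set -----

theorem pvContains_add (s : PySem.Set (Int × Int)) (p q : Int × Int) (hne : q ≠ p) :
    (s.add p).contains q = s.contains q := by
  by_cases hm : q ∈ s
  · rw [(PySem.Set.contains_iff _ _).mpr hm,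
      (PySem.Set.contains_iff _ _).mpr ((PySem.Set.mem_add _ _ _).mpr (Or.inl hm))]
  · have h1 : s.contains q = false := by
      cases h : s.contains q with
      | false => rfl
      | true => exact absurd ((PySem.Set.contains_iff _ _).mp h) hm
    have h2 : (s.add p).contains q = false := by
      cases h : (s.add p).contains q with
      | false => rfl
      | true =>
        rcases (PySem.Set.mem_add _ _ _).mp ((PySem.Set.contains_iff _ _).mp h) with hx | hx
        exacts [absurd hx hm, absurd hx hne]
    rw [h1, h2]

theorem pvMGet_mset (board : List (List (Option String))) (v : List (List Bool))
    (hlen : v.length = board.length) (hrows : ∀ row ∈ v, row.length = board.length)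
    {r c r' c' : Int} (hr : 0 ≤ r) (hr2 : r < (board.length : Int)) (hc : 0 ≤ c)
    (hc2 : c < (board.length : Int)) (hr' : 0 ≤ r') (_hr2' : r' < (board.length : Int))
    (hc' : 0 ≤ c') (_hc2' : c' < (board.length : Int)) :
    pvMGet (pvMSet v r c) r' c' = if r' = r ∧ c' = c then true else pvMGet v r' c' := by
  have hrn : r.toNat < v.length := by omega
  have hrowlen : (v.getD r.toNat []).length = board.length := by
    rw [List.getD_eq_getElem v [] hrn]
    exact hrows _ (List.getElem_mem hrn)
  have hcn : c.toNat < (v.getD r.toNat []).length := by omega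
  simp only [List.getD_eq_getElem?_getD] at hcn
  unfold pvMGet pvMSet
  by_cases hrr : r' = r
  · subst hrr
    by_cases hcc : c' = c
    · subst hcc
      simp only [List.getD_eq_getElem?_getD, List.getElem?_set]
      simp only [hrn, if_true, if_pos rfl, Option.getD_some]
      have hcn2 : c'.toNat < v[r'.toNat].length := by
        simpa [List.getElem?_eq_getElem hrn] using hcn
      simp [List.getElem?_set, hcn2, hcn]
    · have hne : c.toNat ≠ c'.toNat := by omega
      simp only [List.getD_eq_getElem?_getD, List.getElem?_set]
      simp [hrn, hne, hcc]
  · have hne : r.toNat ≠ r'.toNat := by omega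
    simp only [List.getD_eq_getElem?_getD, List.getElem?_set]
    simp [hne, hrr]

theorem pvInv_step (board : List (List (Option String))) (v : List (List Bool))
    (seen : PySem.Set (Int × Int)) (p : Int × Int) (hinv : pvInv board v seen)
    (hg1 : 0 ≤ p.1) (hg2 : p.1 < (board.length : Int)) (hg3 : 0 ≤ p.2)
    (hg4 : p.2 < (board.length : Int)) (hb : pvBGet board p.1 p.2 = none) :
    pvInv board (pvMSet v p.1 p.2) (seen.add p) := by
  obtain ⟨hlen, hrows, hnd, hmem, hrel⟩ := hinv
  refine ⟨by simpa [pvMSet] using hlen, ?_, PySem.Set.nodup_add seen p hnd, ?_, ?_⟩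
  · intro row hrow
    rcases List.mem_or_eq_of_mem_set hrow with h | h
    · exact hrows _ h
    · subst h
      have hrn : p.1.toNat < v.length := by omega
      rw [List.length_set, List.getD_eq_getElem v [] hrn]
      exact hrows _ (List.getElem_mem hrn)
  · intro q hq
    rcases (PySem.Set.mem_add seen p q).mp hq with h | h
    · exact hmem _ h
    · subst h; exact ⟨hg1, hg2, hg3, hg4, hb⟩
  · intro r c h1 h2 h3 h4
    rw [pvMGet_mset board v hlen hrows hg1 hg2 hg3 hg4 h1 h2 h3 h4]
    by_cases hpq : (r, c) = p
    · have hr : r = p.1 := by rw [← hpq]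
      have hc : c = p.2 := by rw [← hpq]
      have hcon : ((seen.add p).contains (r, c)) = true := by
        rw [PySem.Set.contains_iff]
        exact (PySem.Set.mem_add seen p (r, c)).mpr (Or.inr hpq)
      simp [hr, hc]
    · have hne : ¬ (r = p.1 ∧ c = p.2) := by
        intro ⟨h5, h6⟩; exact hpq (by subst h5; subst h6; rfl)
      rw [if_neg hne, hrel r c h1 h2 h3 h4, pvContains_add seen p (r, c) hpq]

theorem pvSeenLen (board : List (List (Option String))) (v : List (List Bool))
    (seen : PySem.Set (Int × Int)) (hinv : pvInv board v seen) :
    seen.length ≤ board.length * board.length := by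
  obtain ⟨-, -, hnd, hmem, -⟩ := hinv
  classical
  have hsub : seen.toFinset ⊆
      (Finset.Icc (0 : ℤ) ((board.length : ℤ) - 1)) ×ˢ
        (Finset.Icc (0 : ℤ) ((board.length : ℤ) - 1)) := by
    intro q hq
    obtain ⟨h1, h2, h3, h4, -⟩ := hmem q (List.mem_toFinset.mp hq)
    simp only [Finset.mem_product, Finset.mem_Icc]
    omega
  have hcard := Finset.card_le_card hsub
  rw [List.toFinset_card_of_nodup hnd] at hcard
  simpa [Finset.card_product, Int.card_Icc] using hcard


theorem pvAdd_fresh (s : PySem.Set (Int × Int)) (p : Int × Int) (h : s.contains p = false) :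
    s.add p = s ++ [p] := by
  have hm : p ∉ s := by
    intro hmem
    rw [(PySem.Set.contains_iff s p).mpr hmem] at h
    simp at h
  simp [PySem.Set.add, hm]

-- one pop's neighbour scan, in lockstep: A's (queue, visited, flag) fold over the deltas against
-- B's (region, seen) fold over the neighbour list
theorem pvDirStep (board : List (List (Option String))) (color : String) (x y : Int) :
    ∀ (ds : List (Int × Int)) (q region : List (Int × Int)) (i : Nat)
      (seen : PySem.Set (Int × Int)) (v : List (List Bool)) (f : Bool),
    pvInv board v seen → q = region.drop (i + 1) → i + 1 ≤ region.length →
    ∃ ext : List (Int × Int),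
      (ds.foldl (pvScanA board color x y) (q, v, f)).1 = q ++ ext ∧
      ((ds.map (fun d => (x + d.1, y + d.2))).foldl (pvScanB board) (region, seen)).1 =
        region ++ ext ∧
      pvInv board (ds.foldl (pvScanA board color x y) (q, v, f)).2.1
        ((ds.map (fun d => (x + d.1, y + d.2))).foldl (pvScanB board) (region, seen)).2 ∧
      (ds.foldl (pvScanA board color x y) (q, v, f)).2.2 =
        (f && ds.all (fun d => pvNbrOK board color (x + d.1, y + d.2))) ∧
      ((ds.map (fun d => (x + d.1, y + d.2))).foldl (pvScanB board) (region, seen)).2.length =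
        seen.length + ext.length := by
  intro ds
  induction ds with
  | nil =>
    intro q region i seen v f hinv hq hi
    exact ⟨[], by simp, by simp, by simpa using hinv, by simp, by simp⟩
  | cons d ds ih =>
    intro q region i seen v f hinv hq hi
    obtain ⟨hlen, hrows, hnd, hmem, hrel⟩ := hinv
    simp only [List.map_cons, List.foldl_cons, List.all_cons]
    set nr := x + d.1 with hnr
    set nc := y + d.2 with hnc
    by_cases hgrid : 0 ≤ nr ∧ nr < (board.length : Int) ∧ 0 ≤ nc ∧ nc < (board.length : Int)
    · obtain ⟨hg1, hg2, hg3, hg4⟩ := hgrid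
      by_cases hvis : pvMGet v nr nc = true
      · -- neighbour already visited (hence empty): both sides skip, pvNbrOK is true
        have hcon : seen.contains (nr, nc) = true := by
          rw [← hrel nr nc hg1 hg2 hg3 hg4]; exact hvis
        have hbn : pvBGet board nr nc = none :=
          (hmem (nr, nc) ((PySem.Set.contains_iff _ _).mp hcon)).2.2.2.2
        have hA : pvScanA board color x y (q, v, f) d = (q, v, f) := by
          simp only [pvScanA]
          rw [if_pos (Or.inr (Or.inr (Or.inr (Or.inr hvis))))]
        have hB : pvScanB board (region, seen) (nr, nc) = (region, seen) := by
          simp only [pvScanB]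
          rw [if_neg (fun h => by rw [hcon] at h; exact absurd h.2.2.2.2.1 (by simp))]
        have hok : pvNbrOK board color (nr, nc) = true := by
          simp only [pvNbrOK]
          rw [if_pos ⟨hg1, hg2, hg3, hg4⟩, hbn]
          rfl
        rw [hA, hB]
        obtain ⟨ext, h1, h2, h3, h4, h5⟩ :=
          ih q region i seen v f ⟨hlen, hrows, hnd, hmem, hrel⟩ hq hi
        exact ⟨ext, h1, h2, h3, by rw [h4, hok]; simp, h5⟩
      · have hvis' : pvMGet v nr nc = false := by
          cases h : pvMGet v nr nc
          · rfl
          · exact absurd h hvis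
        have hcon : seen.contains (nr, nc) = false := by
          rw [← hrel nr nc hg1 hg2 hg3 hg4]; exact hvis'
        have hga : ¬ (nr < 0 ∨ (board.length : Int) ≤ nr ∨ nc < 0 ∨
            (board.length : Int) ≤ nc ∨ pvMGet v nr nc = true) := by
          rintro (h | h | h | h | h)
          · omega
          · omega
          · omega
          · omega
          · exact hvis h
        cases hb : pvBGet board nr nc with
        | none =>
          -- fresh empty neighbour: both sides append and mark it
          have hA : pvScanA board color x y (q, v, f) d =
              (q ++ [(nr, nc)], pvMSet v nr nc, f) := by
            simp only [pvScanA]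
            rw [if_neg hga, if_pos hb]
          have hB : pvScanB board (region, seen) (nr, nc) =
              (region ++ [(nr, nc)], seen.add (nr, nc)) := by
            simp only [pvScanB]
            rw [if_pos ⟨hg1, hg2, hg3, hg4, hcon, hb⟩]
          have hok : pvNbrOK board color (nr, nc) = true := by
            simp only [pvNbrOK]
            rw [if_pos ⟨hg1, hg2, hg3, hg4⟩, hb]
            rfl
          rw [hA, hB]
          have hinv' : pvInv board (pvMSet v nr nc) (seen.add (nr, nc)) :=
            pvInv_step board v seen (nr, nc) ⟨hlen, hrows, hnd, hmem, hrel⟩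
              hg1 hg2 hg3 hg4 hb
          obtain ⟨ext, h1, h2, h3, h4, h5⟩ :=
            ih (q ++ [(nr, nc)]) (region ++ [(nr, nc)]) i (seen.add (nr, nc))
              (pvMSet v nr nc) f hinv'
              (by rw [List.drop_append_of_le_length hi, ← hq])
              (by simp; omega)
          refine ⟨(nr, nc) :: ext, ?_, ?_, h3, by rw [h4, hok]; simp, ?_⟩
          · rw [h1]; simp
          · rw [h2]; simp
          · rw [h5, pvAdd_fresh seen (nr, nc) hcon]
            simp
            omega
        | some s =>
          -- stone neighbour: B skips; A skips or clears the flag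
          have hB : pvScanB board (region, seen) (nr, nc) = (region, seen) := by
            simp only [pvScanB]
            rw [if_neg (fun h => by rw [hb] at h; exact absurd h.2.2.2.2.2 (by simp))]
          rw [hB]
          by_cases hcol : s = color
          · have hA : pvScanA board color x y (q, v, f) d = (q, v, f) := by
              simp only [pvScanA]
              rw [if_neg hga, if_neg (fun h => by rw [hb] at h; exact absurd h (by simp)),
                if_neg (by rw [hb, hcol]; simp)]
            have hok : pvNbrOK board color (nr, nc) = true := by
              simp only [pvNbrOK]
              rw [if_pos ⟨hg1, hg2, hg3, hg4⟩, hb, hcol]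
              simp
            rw [hA]
            obtain ⟨ext, h1, h2, h3, h4, h5⟩ :=
              ih q region i seen v f ⟨hlen, hrows, hnd, hmem, hrel⟩ hq hi
            exact ⟨ext, h1, h2, h3, by rw [h4, hok]; simp, h5⟩
          · have hA : pvScanA board color x y (q, v, f) d = (q, v, false) := by
              simp only [pvScanA]
              rw [if_neg hga, if_neg (fun h => by rw [hb] at h; exact absurd h (by simp)),
                if_pos (by rw [hb]; simp [hcol])]
            have hok : pvNbrOK board color (nr, nc) = false := by
              simp only [pvNbrOK]
              rw [if_pos ⟨hg1, hg2, hg3, hg4⟩, hb]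
              simp [hcol]
            rw [hA]
            obtain ⟨ext, h1, h2, h3, h4, h5⟩ :=
              ih q region i seen v false ⟨hlen, hrows, hnd, hmem, hrel⟩ hq hi
            exact ⟨ext, h1, h2, h3, by rw [h4, hok]; simp, h5⟩
    · -- out of bounds: both sides skip, pvNbrOK is true
      have hone : nr < 0 ∨ (board.length : Int) ≤ nr ∨ nc < 0 ∨ (board.length : Int) ≤ nc := by
        omega
      have hA : pvScanA board color x y (q, v, f) d = (q, v, f) := by
        simp only [pvScanA]
        rw [if_pos (by tauto)]
      have hB : pvScanB board (region, seen) (nr, nc) = (region, seen) := by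
        simp only [pvScanB]
        rw [if_neg (fun h => hgrid ⟨h.1, h.2.1, h.2.2.1, h.2.2.2.1⟩)]
      have hok : pvNbrOK board color (nr, nc) = true := by
        simp only [pvNbrOK]
        rw [if_neg hgrid]
      rw [hA, hB]
      obtain ⟨ext, h1, h2, h3, h4, h5⟩ :=
        ih q region i seen v f ⟨hlen, hrows, hnd, hmem, hrel⟩ hq hi
      exact ⟨ext, h1, h2, h3, by rw [h4, hok]; simp, h5⟩

theorem pvNbrs_eq_map (x y : Int) :
    pvNbrs x y = pvDirs.map (fun d => (x + d.1, y + d.2)) := by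
  simp [pvNbrs, pvDirs]
  omega

-- the whole flood, in lockstep: A's queue loop against B's cursor loop
theorem pvBisim (board : List (List (Option String))) (color : String) :
    ∀ (fuel : Nat) (q region : List (Int × Int)) (i : Nat) (seen : PySem.Set (Int × Int))
      (v : List (List Bool)) (f : Bool),
    pvInv board v seen → q = region.drop i →
    f = pvEnclosed board color (region.take i) →
    q.length + (board.length * board.length - seen.length) ≤ fuel →
    (pvCheckLoop board color fuel q v f).2 =
      pvEnclosed board color (pvGrow board fuel region i seen).1 ∧
    pvInv board (pvCheckLoop board color fuel q v f).1 (pvGrow board fuel region i seen).2 := by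
  intro fuel
  induction fuel with
  | zero =>
    intro q region i seen v f hinv hq hf hfuel
    have hq0 : q = [] := by
      cases q with
      | nil => rfl
      | cons a l => simp at hfuel
    subst hq0
    have hile : region.length ≤ i := List.drop_eq_nil_iff.mp hq.symm
    simp only [pvCheckLoop, pvGrow]
    exact ⟨by rw [hf, List.take_of_length_le hile], hinv⟩
  | succ fuel ih =>
    intro q region i seen v f hinv hq hf hfuel
    cases q with
    | nil =>
      have hile : region.length ≤ i := List.drop_eq_nil_iff.mp hq.symm
      simp only [pvCheckLoop, pvGrow, dif_neg (by omega : ¬ i < region.length)]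
      exact ⟨by rw [hf, List.take_of_length_le hile], hinv⟩
    | cons p q' =>
      obtain ⟨px, py⟩ := p
      have hlt : i < region.length := by
        by_contra hle
        rw [(List.drop_eq_nil_iff).mpr (by omega)] at hq
        cases hq
      have hcd := List.getElem_cons_drop hlt
      rw [← hq] at hcd
      have hget : region[i] = (px, py) := (List.cons.injEq _ _ _ _ ▸ hcd).1
      have hq' : q' = region.drop (i + 1) := ((List.cons.injEq _ _ _ _ ▸ hcd).2).symm
      obtain ⟨ext, h1, h2, h3, h4, h5⟩ :=
        pvDirStep board color px py pvDirs q' region i seen v f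
          ⟨hinv.1, hinv.2.1, hinv.2.2.1, hinv.2.2.2.1, hinv.2.2.2.2⟩ hq' hlt
      have hgrow : pvGrow board (fuel + 1) region i seen =
          pvGrow board fuel
            ((pvDirs.map (fun d => (px + d.1, py + d.2))).foldl (pvScanB board)
              (region, seen)).1 (i + 1)
            ((pvDirs.map (fun d => (px + d.1, py + d.2))).foldl (pvScanB board)
              (region, seen)).2 := by
        simp only [pvGrow, dif_pos hlt, hget, pvNbrs_eq_map]
      have hloop : pvCheckLoop board color (fuel + 1) ((px, py) :: q') v f =
          pvCheckLoop board color fuel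
            (pvDirs.foldl (pvScanA board color px py) (q', v, f)).1
            (pvDirs.foldl (pvScanA board color px py) (q', v, f)).2.1
            (pvDirs.foldl (pvScanA board color px py) (q', v, f)).2.2 := by
        simp only [pvCheckLoop]
      rw [hloop, hgrow]
      set stA := pvDirs.foldl (pvScanA board color px py) (q', v, f) with hstA
      set stB := (pvDirs.map (fun d => (px + d.1, py + d.2))).foldl (pvScanB board)
        (region, seen) with hstB
      have hq2 : stA.1 = stB.1.drop (i + 1) := by
        rw [h1, h2, List.drop_append_of_le_length (by omega), ← hq']
      have htake : stB.1.take (i + 1) = region.take i ++ [(px, py)] := by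
        rw [h2, List.take_append_of_le_length (by omega), List.take_add_one,
          List.getElem?_eq_getElem hlt, hget]
        rfl
      have hf2 : stA.2.2 = pvEnclosed board color (stB.1.take (i + 1)) := by
        rw [h4, hf, htake]
        unfold pvEnclosed
        rw [List.all_append]
        simp only [List.all_cons, List.all_nil, Bool.and_true]
        rw [pvNbrs_eq_map, List.all_map]
        rfl
      have hsl : stB.2.length ≤ board.length * board.length :=
        pvSeenLen board stA.2.1 stB.2 h3
      have hlen1 : stA.1.length = q'.length + ext.length := by rw [h1]; simp
      have hfuel2 : stA.1.length +
          (board.length * board.length - stB.2.length) ≤ fuel := by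
        simp only [List.length_cons] at hfuel
        omega
      exact ih stA.1 stB.1 (i + 1) stB.2 stA.2.1 stA.2.2 h3 hq2 hf2 hfuel2

-- one cell of the outer double loop, in lockstep
theorem pvCellStep (board : List (List (Option String))) (color : String) (row col : Int)
    (h1 : 0 ≤ row) (h2 : row < (board.length : Int)) (h3 : 0 ≤ col)
    (h4 : col < (board.length : Int))
    (stA : List (List Bool) × Int) (stB : PySem.Set (Int × Int) × Int)
    (hinv : pvInv board stA.1 stB.1) (hcnt : stA.2 = stB.2) :
    pvInv board (pvCellA board color row stA col).1 (pvCellB board color row stB col).1 ∧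
    (pvCellA board color row stA col).2 = (pvCellB board color row stB col).2 := by
  have hrel := hinv.2.2.2.2 row col h1 h2 h3 h4
  by_cases hbn : pvBGet board row col = none
  · by_cases hcon : stB.1.contains (row, col) = true
    · have hm : pvMGet stA.1 row col = true := by rw [hrel]; exact hcon
      unfold pvCellA pvCellB
      rw [if_neg (fun hg => by rw [hm] at hg; exact absurd hg.2 (by simp)),
        if_neg (fun hg => by rw [hcon] at hg; exact absurd hg.2 (by simp))]
      exact ⟨hinv, hcnt⟩
    · have hcon' : stB.1.contains (row, col) = false := by
        cases h : stB.1.contains (row, col)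
        · rfl
        · exact absurd h hcon
      have hm : pvMGet stA.1 row col = false := by rw [hrel]; exact hcon'
      unfold pvCellA pvCellB
      rw [if_pos ⟨hbn, hm⟩, if_pos ⟨hbn, hcon'⟩]
      have hinv' : pvInv board (pvMSet stA.1 row col) (stB.1.add (row, col)) :=
        pvInv_step board stA.1 stB.1 (row, col) hinv h1 h2 h3 h4 hbn
      obtain ⟨hflag, hinvf⟩ :=
        pvBisim board color (board.length * board.length + 1)
          [(row, col)] [(row, col)] 0 (stB.1.add (row, col)) (pvMSet stA.1 row col) true
          hinv' (by simp) (by simp [pvEnclosed])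
          (by simp only [List.length_cons, List.length_nil]; omega)
      unfold pvCheckTerritory
      refine ⟨hinvf, ?_⟩
      show (if (pvCheckLoop board color (board.length * board.length + 1) [(row, col)]
          (pvMSet stA.1 row col) true).2 = true then stA.2 + 1 else stA.2) =
        (if pvEnclosed board color (pvGrow board (board.length * board.length + 1)
          [(row, col)] 0 (stB.1.add (row, col))).1 = true then stB.2 + 1 else stB.2)
      rw [hflag, hcnt]
  · unfold pvCellA pvCellB
    rw [if_neg (fun hg => hbn hg.1), if_neg (fun hg => hbn hg.1)]
    exact ⟨hinv, hcnt⟩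

theorem pvColsFold (board : List (List (Option String))) (color : String) (row : Int)
    (h1 : 0 ≤ row) (h2 : row < (board.length : Int)) :
    ∀ (cols : List Int), (∀ col ∈ cols, 0 ≤ col ∧ col < (board.length : Int)) →
    ∀ (stA : List (List Bool) × Int) (stB : PySem.Set (Int × Int) × Int),
    pvInv board stA.1 stB.1 → stA.2 = stB.2 →
    pvInv board (cols.foldl (pvCellA board color row) stA).1
      (cols.foldl (pvCellB board color row) stB).1 ∧
    (cols.foldl (pvCellA board color row) stA).2 =
      (cols.foldl (pvCellB board color row) stB).2 := by
  intro cols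
  induction cols with
  | nil => intro _ stA stB hinv hcnt; exact ⟨hinv, hcnt⟩
  | cons col cols ih =>
    intro hmem stA stB hinv hcnt
    obtain ⟨hc1, hc2⟩ := hmem col (List.mem_cons_self)
    obtain ⟨hinv', hcnt'⟩ := pvCellStep board color row col h1 h2 hc1 hc2 stA stB hinv hcnt
    exact ih (fun x hx => hmem x (List.mem_cons_of_mem _ hx)) _ _ hinv' hcnt'

theorem pvRowsFold (board : List (List (Option String))) (color : String)
    (hsq : ∀ row ∈ board, row.length = board.length) :
    ∀ (rows : List Int), (∀ r ∈ rows, 0 ≤ r ∧ r < (board.length : Int)) →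
    ∀ (stA : List (List Bool) × Int) (stB : PySem.Set (Int × Int) × Int),
    pvInv board stA.1 stB.1 → stA.2 = stB.2 →
    pvInv board (rows.foldl (pvRowA board color) stA).1
      (rows.foldl (pvRowB board color) stB).1 ∧
    (rows.foldl (pvRowA board color) stA).2 =
      (rows.foldl (pvRowB board color) stB).2 := by
  intro rows
  induction rows with
  | nil => intro _ stA stB hinv hcnt; exact ⟨hinv, hcnt⟩
  | cons r rows ih =>
    intro hmem stA stB hinv hcnt
    obtain ⟨hr1, hr2⟩ := hmem r (List.mem_cons_self)
    have hrow : PySem.List.pyGetD board r [] = board[r.toNat] :=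
      PySem.List.pyGetD_eq_getElem board [] hr1 hr2
    have hrowlen : (PySem.List.pyGetD board r []).length = board.length := by
      rw [hrow]
      exact hsq _ (List.getElem_mem (by omega))
    have hcols : ∀ col ∈ PySem.List.pyRange 0 ((PySem.List.pyGetD board r []).length : Int) 1,
        0 ≤ col ∧ col < (board.length : Int) := by
      intro col hcol
      have := PySem.List.mem_pyRange_one.mp hcol
      rw [hrowlen] at this
      exact this
    obtain ⟨hinv', hcnt'⟩ :=
      pvColsFold board color r hr1 hr2 _ hcols stA stB hinv hcnt
    exact ih (fun x hx => hmem x (List.mem_cons_of_mem _ hx)) _ _ hinv' hcnt'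

theorem pvInv_init (board : List (List (Option String))) :
    pvInv board (List.replicate board.length (List.replicate board.length false))
      PySem.Set.empty := by
  refine ⟨by simp, ?_, List.nodup_nil, by simp [PySem.Set.empty], ?_⟩
  · intro row h
    rw [List.eq_of_mem_replicate h]
    simp
  · intro r c hr1 hr2 hc1 hc2
    unfold pvMGet
    rw [List.getD_replicate _ (by omega), List.getD_replicate _ (by omega)]
    rfl

-- a fold whose body never fires is the identity (used for the no-empty-cell case)
theorem pvFoldId {α : Type} (g : α → Int → α) :
    ∀ (l : List Int), (∀ x ∈ l, ∀ s, g s x = s) → ∀ s, l.foldl g s = s := by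
  intro l
  induction l with
  | nil => intro _ s; rfl
  | cons x l ih =>
    intro h s
    rw [List.foldl_cons, h x List.mem_cons_self]
    exact ih (fun y hy => h y (List.mem_cons_of_mem _ hy)) s

theorem pvCellNoNone (board : List (List (Option String)))
    (hnone : ∀ row ∈ board, ∀ cell ∈ row, cell ≠ none) (r col : Int)
    (hr1 : 0 ≤ r) (hr2 : r < (board.length : Int))
    (hcol : col ∈ PySem.List.pyRange 0 ((PySem.List.pyGetD board r []).length : Int) 1) :
    pvBGet board r col ≠ none := by
  have hrow : PySem.List.pyGetD board r [] = board[r.toNat] :=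
    PySem.List.pyGetD_eq_getElem board [] hr1 hr2
  have hc := PySem.List.mem_pyRange_one.mp hcol
  have hclt : col < ((PySem.List.pyGetD board r []).length : Int) := hc.2
  unfold pvBGet
  rw [hrow] at hclt ⊢
  rw [PySem.List.pyGetD_eq_getElem _ none hc.1 hclt]
  exact hnone _ (List.getElem_mem (by omega)) _ (List.getElem_mem _)

-- ===== VERDICT (by name: the statement is the Claim_ definition above) =====
theorem count_territories_spec : Claim_equal_count_territories := by
  intro board color _ hpre
  unfold Spec_count_territories
  rcases hpre with hsq | hnone
  · unfold count_territories count_territories_alt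
    exact (pvRowsFold board color hsq _
      (fun r hr => PySem.List.mem_pyRange_one.mp hr)
      (List.replicate board.length (List.replicate board.length false), 0)
      (PySem.Set.empty, 0) (pvInv_init board) rfl).2
  · unfold count_territories count_territories_alt
    rw [pvFoldId (pvRowA board color) _ ?_, pvFoldId (pvRowB board color) _ ?_]
    · intro r hr st
      obtain ⟨hr1, hr2⟩ := PySem.List.mem_pyRange_one.mp hr
      unfold pvRowB
      exact pvFoldId (pvCellB board color r) _ (fun col hcol s => by
        unfold pvCellB
        rw [if_neg (fun hg => pvCellNoNone board hnone r col hr1 hr2 hcol hg.1)]) st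
    · intro r hr st
      obtain ⟨hr1, hr2⟩ := PySem.List.mem_pyRange_one.mp hr
      unfold pvRowA
      exact pvFoldId (pvCellA board color r) _ (fun col hcol s => by
        unfold pvCellA
        rw [if_neg (fun hg => pvCellNoNone board hnone r col hr1 hr2 hcol hg.1)]) st
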